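-- pv_equiv track=rewrite | github.com/extrowerk/firewall_rules | macroproc.py | dedupe_comment_blocks
-- ===== SOURCE A (Python) =====
-- def dedupe_comment_blocks(lines):
--     out = []
--     seen = set()
--     i = 0
--     n = len(lines)
--     while i < n:
--         if lines[i].lstrip().startswith("#"):
--             block = []
--             while i < n and lines[i].lstrip().startswith("#"):
--                 block.append(lines[i])
--                 i += 1
--             block_text = "\n".join(block)
--             if block_text not in seen:
--                 seen.add(block_text)
--                 out.extend(block)
--         else:
--             out.append(lines[i])
--             i += 1
--     return out
-- ===== SOURCE B (Python) =====
-- def dedupe_comment_blocks(lines):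
--     # Phase 1: split into maximal runs of equal comment-ness, in one pass.
--     groups = []
--     for l in lines:
--         k = l.lstrip().startswith("#")
--         if groups and groups[-1][0] == k:
--             groups[-1][1].append(l)
--         else:
--             groups.append((k, [l]))
--     # Phase 2: emit runs, skipping comment runs whose joined text was seen.
--     out = []
--     seen = set()
--     for k, g in groups:
--         if k:
--             t = "\n".join(g)
--             if t in seen:
--                 continue
--             seen.add(t)
--         out.extend(g)
--     return out
-- ===== Notes on version B (the rewrite author's own statement) =====
-- stated objective: alternative
-- what changed: Replaced the dual-index nested while-loop (which inline-collects comment blocks and copies non-comment lines one at a time) with a two-phase pipeline: one pass grouping all lines into maximal runs by comment-ness, then one pass over the runs that dedupes comment runs by their joined text.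
import Mathlib
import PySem

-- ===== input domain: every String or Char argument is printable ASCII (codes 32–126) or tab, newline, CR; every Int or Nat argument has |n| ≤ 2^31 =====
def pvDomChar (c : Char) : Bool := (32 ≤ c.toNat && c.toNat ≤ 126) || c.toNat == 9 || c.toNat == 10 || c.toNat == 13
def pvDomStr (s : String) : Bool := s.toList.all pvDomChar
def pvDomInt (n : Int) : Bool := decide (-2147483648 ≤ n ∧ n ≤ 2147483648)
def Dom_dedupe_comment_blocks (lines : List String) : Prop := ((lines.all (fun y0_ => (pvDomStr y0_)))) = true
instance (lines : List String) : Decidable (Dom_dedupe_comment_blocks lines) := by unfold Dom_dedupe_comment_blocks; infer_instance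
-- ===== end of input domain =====

-- B replaces A's dual-index nested while-loop with a two-phase pipeline (group all lines
-- into maximal runs, then dedupe comment runs); objective: alternative decomposition, same cost.

-- ===== PORT A =====

-- "lines[i].lstrip().startswith('#')"
def pvIsComment (l : String) : Bool := PySem.Str.startswith (PySem.Str.lstrip l) "#"

-- A's inner while-loop: collect the maximal comment prefix, return it with the rest.
def pvTakeBlock : List String → List String × List String
  | [] => ([], [])
  | l :: rest =>
    if pvIsComment l then
      let p := pvTakeBlock rest
      (l :: p.1, p.2)
    else ([], l :: rest)

-- termination helper for pvAGo (cited in its decreasing_by)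
theorem pvTakeBlock_snd_length (xs : List String) : (pvTakeBlock xs).2.length ≤ xs.length := by
  induction xs with
  | nil => simp [pvTakeBlock]
  | cons l rest ih =>
    by_cases h : pvIsComment l = true <;> simp [pvTakeBlock, h] <;> omega

-- A's outer while-loop, state = (remaining lines, out, seen)
def pvAGo (xs : List String) (out : List String) (seen : PySem.Set String) : List String :=
  match hx : xs with
  | [] => out
  | l :: rest =>
    if hc : pvIsComment l = true then
      let p := pvTakeBlock (l :: rest)
      let block_text := PySem.Str.join "\n" p.1
      if PySem.Set.contains seen block_text then
        pvAGo p.2 out seen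
      else
        pvAGo p.2 (out ++ p.1) (PySem.Set.add seen block_text)
    else
      pvAGo rest (out ++ [l]) seen
termination_by xs.length
decreasing_by
  · simp only [pvTakeBlock, hc, if_pos]
    have := pvTakeBlock_snd_length rest
    simp only [List.length_cons]; omega
  · simp only [pvTakeBlock, hc, if_pos]
    have := pvTakeBlock_snd_length rest
    simp only [List.length_cons]; omega
  · simp

def dedupe_comment_blocks (lines : List String) : List String :=
  pvAGo lines [] PySem.Set.empty

-- ===== PORT B =====

-- phase 1 loop body: append l to the last run if its key matches, else open a new run
def pvAddLine (groups : List (Bool × List String)) (l : String) : List (Bool × List String) :=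
  let k := pvIsComment l
  match groups.getLast? with
  | some g0 =>
    if g0.1 == k then groups.dropLast ++ [(g0.1, g0.2 ++ [l])]
    else groups ++ [(k, [l])]
  | none => groups ++ [(k, [l])]

-- phase 2 loop body: emit a run, skipping an already-seen comment run
def pvEmit (acc : List String × PySem.Set String) (p : Bool × List String) :
    List String × PySem.Set String :=
  if p.1 then
    let t := PySem.Str.join "\n" p.2
    if PySem.Set.contains acc.2 t then acc
    else (acc.1 ++ p.2, PySem.Set.add acc.2 t)
  else (acc.1 ++ p.2, acc.2)

def dedupe_comment_blocks_alt (lines : List String) : List String :=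
  ((lines.foldl pvAddLine []).foldl pvEmit ([], PySem.Set.empty)).1

-- ===== PRECONDITION & SPEC =====
def Spec_dedupe_comment_blocks (lines : List String) (out : List String) : Prop := out = dedupe_comment_blocks_alt lines
instance (lines : List String) (out : List String) : Decidable (Spec_dedupe_comment_blocks lines out) := by unfold Spec_dedupe_comment_blocks; infer_instance

-- ===== CLAIM (what is proved, stated in full; the proofs are below) =====
def Claim_equal_dedupe_comment_blocks : Prop := ∀ (lines : List String), Dom_dedupe_comment_blocks lines → Spec_dedupe_comment_blocks lines (dedupe_comment_blocks lines)

-- ===== LEMMAS AND PROOFS =====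

-- run decomposition used to relate the two ports: pvConsRun k g xs extends the open run (k, g)
def pvConsRun (k : Bool) (g : List String) : List String → List (Bool × List String)
  | [] => [(k, g)]
  | l :: rest =>
    if pvIsComment l = k then pvConsRun k (g ++ [l]) rest
    else (k, g) :: pvConsRun (pvIsComment l) [l] rest

def pvRuns : List String → List (Bool × List String)
  | [] => []
  | l :: rest => pvConsRun (pvIsComment l) [l] rest

-- span on the key: the maximal prefix with pvIsComment = k, and the rest
def pvSpanK (k : Bool) : List String → List String × List String
  | [] => ([], [])
  | l :: r =>
    if pvIsComment l = k then
      let p := pvSpanK k r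
      (l :: p.1, p.2)
    else ([], l :: r)

theorem pvSpanK_snd_length (k : Bool) (xs : List String) :
    (pvSpanK k xs).2.length ≤ xs.length := by
  induction xs with
  | nil => simp [pvSpanK]
  | cons l r ih =>
    by_cases h : pvIsComment l = k <;> simp [pvSpanK, h] <;> omega

theorem pvTakeBlock_eq_spanK (xs : List String) : pvTakeBlock xs = pvSpanK true xs := by
  induction xs with
  | nil => rfl
  | cons l r ih =>
    by_cases h : pvIsComment l = true <;> simp [pvTakeBlock, pvSpanK, h, ih]

-- B's phase-1 fold builds exactly the run decomposition
theorem pvFoldl_addLine (ls : List String) :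
    ∀ (gs : List (Bool × List String)) (k : Bool) (g : List String),
      ls.foldl pvAddLine (gs ++ [(k, g)]) = gs ++ pvConsRun k g ls := by
  induction ls with
  | nil => intro gs k g; simp [pvConsRun]
  | cons l ls ih =>
    intro gs k g
    by_cases h : pvIsComment l = k
    · have : pvAddLine (gs ++ [(k, g)]) l = gs ++ [(k, g ++ [l])] := by
        simp [pvAddLine, List.getLast?_concat, h, List.dropLast_concat]
      simp only [List.foldl_cons, this, ih, pvConsRun, h, if_pos]
    · have : pvAddLine (gs ++ [(k, g)]) l = (gs ++ [(k, g)]) ++ [(pvIsComment l, [l])] := by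
        simp [pvAddLine, List.getLast?_concat, Ne.symm h]
      simp only [List.foldl_cons, this, ih, pvConsRun, h, if_neg, not_false_iff]
      simp
theorem pvFoldl_addLine_nil (lines : List String) :
    lines.foldl pvAddLine [] = pvRuns lines := by
  cases lines with
  | nil => rfl
  | cons l ls =>
    have h : pvAddLine [] l = [] ++ [(pvIsComment l, [l])] := by simp [pvAddLine]
    simp only [List.foldl_cons, h, pvFoldl_addLine, pvRuns]
    simp

-- pvConsRun in terms of pvSpanK
theorem pvConsRun_eq (xs : List String) : ∀ (k : Bool) (g : List String),
    pvConsRun k g xs = (k, g ++ (pvSpanK k xs).1) :: pvRuns (pvSpanK k xs).2 := by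
  induction xs with
  | nil => intro k g; simp [pvConsRun, pvSpanK, pvRuns]
  | cons l r ih =>
    intro k g
    by_cases h : pvIsComment l = k
    · simp only [pvConsRun, pvSpanK, h, if_pos, ih]
      simp
    · simp only [pvConsRun, pvSpanK, h, if_neg, not_false_iff]
      simp [pvRuns]

-- A walks through a run of non-comment lines one line at a time
theorem pvAGo_skip_noncomment (xs : List String) : ∀ (out : List String) (seen : PySem.Set String),
    pvAGo xs out seen = pvAGo (pvSpanK false xs).2 (out ++ (pvSpanK false xs).1) seen := by
  induction xs with
  | nil => intro out seen; simp [pvSpanK]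
  | cons l r ih =>
    intro out seen
    by_cases h : pvIsComment l = true
    · have h' : ¬ (pvIsComment l = false) := by simp [h]
      simp [pvSpanK, h']
    · rw [pvAGo]
      simp only [h, dite_false]
      rw [ih]
      have h' : pvIsComment l = false := by simpa using h
      simp [pvSpanK, h']

-- main invariant: A's loop = B's phase-2 fold over the run decomposition
theorem pvMain (n : Nat) : ∀ (xs : List String), xs.length ≤ n →
    ∀ (out : List String) (seen : PySem.Set String),
      pvAGo xs out seen = ((pvRuns xs).foldl pvEmit (out, seen)).1 := by
  induction n with
  | zero =>
    intro xs hx out seen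
    have : xs = [] := by cases xs <;> simp_all
    subst this; simp [pvAGo, pvRuns]
  | succ n ih =>
    intro xs hx out seen
    cases xs with
    | nil => simp [pvAGo, pvRuns]
    | cons l rest =>
      by_cases h : pvIsComment l = true
      · -- comment block
        have hb : pvTakeBlock (l :: rest) =
            (l :: (pvSpanK true rest).1, (pvSpanK true rest).2) := by
          rw [pvTakeBlock_eq_spanK]; simp [pvSpanK, h]
        have hlen : (pvSpanK true rest).2.length <= n := by
          have := pvSpanK_snd_length true rest
          simp at hx; omega
        have hruns : pvRuns (l :: rest) =
            (true, l :: (pvSpanK true rest).1) :: pvRuns (pvSpanK true rest).2 := by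
          rw [show pvRuns (l :: rest) = pvConsRun (pvIsComment l) [l] rest from rfl, h,
              pvConsRun_eq]
          simp
        have e1 : pvEmit (out, seen) (true, l :: (pvSpanK true rest).1) =
            if PySem.Set.contains seen (PySem.Str.join "\n" (l :: (pvSpanK true rest).1)) = true
            then (out, seen)
            else (out ++ l :: (pvSpanK true rest).1,
                  PySem.Set.add seen (PySem.Str.join "\n" (l :: (pvSpanK true rest).1))) := rfl
        rw [pvAGo]
        simp only [h, dite_true, hb, hruns, List.foldl_cons]
        by_cases hs : PySem.Set.contains seen
            (PySem.Str.join "\n" (l :: (pvSpanK true rest).1)) = true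
        · rw [if_pos hs, e1, if_pos hs, ih _ hlen]
        · rw [if_neg hs, e1, if_neg hs, ih _ hlen]
      · -- non-comment run
        have h' : pvIsComment l = false := by simpa using h
        have hsp : pvSpanK false (l :: rest) =
            (l :: (pvSpanK false rest).1, (pvSpanK false rest).2) := by
          simp [pvSpanK, h']
        have hlen : (pvSpanK false rest).2.length ≤ n := by
          have := pvSpanK_snd_length false rest
          simp at hx; omega
        have hruns : pvRuns (l :: rest) =
            (false, l :: (pvSpanK false rest).1) :: pvRuns (pvSpanK false rest).2 := by
          rw [show pvRuns (l :: rest) = pvConsRun (pvIsComment l) [l] rest from rfl, h',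
              pvConsRun_eq]
          simp
        have e1 : pvEmit (out, seen) (false, l :: (pvSpanK false rest).1) =
            (out ++ l :: (pvSpanK false rest).1, seen) := rfl
        rw [pvAGo_skip_noncomment, hsp, hruns]
        simp only [List.foldl_cons, e1]
        exact ih _ hlen _ _

-- ===== VERDICT (by name: the statement is the Claim_ definition above) =====
theorem dedupe_comment_blocks_spec : Claim_equal_dedupe_comment_blocks := by
  intro lines _
  unfold Spec_dedupe_comment_blocks dedupe_comment_blocks dedupe_comment_blocks_alt
  rw [pvFoldl_addLine_nil]
  exact pvMain lines.length lines (le_refl _) [] PySem.Set.empty
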